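-- pv_equiv track=rewrite | github.com/cpratim/Project-Euler | tests/problem188.py | base2
-- ===== SOURCE A (Python) =====
-- def base2(n):
--     a = []
--     i = 0
--     while n > 0:
--         a.append((n % 2)*(2**i))
--         i += 1
--         n //= 2
--     return a
-- ===== SOURCE B (Python) =====
-- def base2(n):
--     if n <= 0:
--         return []
--     s = bin(n)[2:]
--     return [int(d) * (2 ** i) for i, d in enumerate(reversed(s))]
-- ===== Notes on version B (the rewrite author's own statement) =====
-- stated objective: idiomatic
-- what changed: Replaces A's mod/div bit-extraction while-loop with the library binary-string conversion followed by one enumerate pass over the reversed digit string producing digit times place value.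
import Mathlib
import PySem

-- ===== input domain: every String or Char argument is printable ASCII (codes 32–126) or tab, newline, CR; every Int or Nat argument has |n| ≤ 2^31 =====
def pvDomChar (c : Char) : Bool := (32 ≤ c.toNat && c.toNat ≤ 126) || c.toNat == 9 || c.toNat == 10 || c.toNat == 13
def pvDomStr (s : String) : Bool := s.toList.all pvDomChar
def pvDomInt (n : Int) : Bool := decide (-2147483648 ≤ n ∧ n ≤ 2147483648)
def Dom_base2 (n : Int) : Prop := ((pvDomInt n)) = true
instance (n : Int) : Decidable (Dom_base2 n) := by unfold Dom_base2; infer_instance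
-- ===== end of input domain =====

-- B replaces A's mod/div bit-extraction loop by the library binary conversion (bin(n)[2:])
-- followed by one enumerate pass over the reversed digit string (objective: idiomatic).


-- ===== PORT A =====
-- the while-loop of A: state (n, i); appends (n % 2)*(2**i) while n > 0
def base2Loop (n : Int) (i : Nat) : List Int :=
  if h : 0 < n then
    (PySem.Int.mod n 2) * 2 ^ i :: base2Loop (PySem.Int.floordiv n 2) (i + 1)
  else []
termination_by n.toNat
decreasing_by
  rw [PySem.Int.floordiv_eq_ediv_of_pos (by omega)]
  omega

def base2 (n : Int) : List Int := base2Loop n 0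

-- ===== PORT B =====
-- bin(n)[2:] for n > 0 is PySem.Int.toBinChars n; int(d) on the digit chars '0'/'1'
-- is ported exactly as the char-code arithmetic (d.toNat - 48 : Int).
def base2_alt (n : Int) : List Int :=
  if n ≤ 0 then []
  else
    (PySem.List.enumerate (PySem.Int.toBinChars n).reverse 0).map
      (fun p => ((p.2.toNat : Int) - 48) * 2 ^ p.1.toNat)

-- ===== PRECONDITION & SPEC =====
def Spec_base2 (n : Int) (out : List Int) : Prop := out = base2_alt n
instance (n : Int) (out : List Int) : Decidable (Spec_base2 n out) := by unfold Spec_base2; infer_instance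

-- ===== CLAIM (what is proved, stated in full; the proofs are below) =====
def Claim_equal_base2 : Prop := ∀ (n : Int), Dom_base2 n → Spec_base2 n (base2 n)

-- ===== LEMMAS AND PROOFS =====

-- binary digits of m, least significant first
def charsLSB (m : Nat) : List Char :=
  if m = 0 then [] else Nat.digitChar (m % 2) :: charsLSB (m / 2)

theorem toDigitsCore_eq_charsLSB (fuel : Nat) :
    ∀ (m : Nat) (ds : List Char), 0 < m → m < fuel →
      Nat.toDigitsCore 2 fuel m ds = (charsLSB m).reverse ++ ds := by
  induction fuel with
  | zero => intro m ds hm hf; omega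
  | succ f ih =>
    intro m ds hm hf
    rw [Nat.toDigitsCore]
    by_cases h : m / 2 = 0
    · have hm1 : m = 1 := by omega
      subst hm1
      simp [charsLSB]
    · have h2 : 2 ≤ m := by omega
      simp only [if_neg h]
      rw [ih (m / 2) _ (by omega) (by omega)]
      conv_rhs => rw [charsLSB, if_neg (by omega : ¬ m = 0)]
      simp

theorem toDigits_two_reverse (m : Nat) (hm : 0 < m) :
    (Nat.toDigits 2 m).reverse = charsLSB m := by
  unfold Nat.toDigits
  rw [toDigitsCore_eq_charsLSB (m + 1) m [] hm (by omega)]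
  simp

theorem base2Loop_eq_enumMap (k : Nat) :
    ∀ (n : Int) (i : Nat), n.toNat = k →
      base2Loop n i =
        (PySem.List.enumerate (charsLSB n.toNat) (i : Int)).map
          (fun p => ((p.2.toNat : Int) - 48) * 2 ^ p.1.toNat) := by
  induction k using Nat.strong_induction_on with
  | _ k ih =>
    intro n i hk
    rw [base2Loop]
    by_cases h : 0 < n
    · simp only [dif_pos h]
      have hfd : PySem.Int.floordiv n 2 = n / 2 :=
        PySem.Int.floordiv_eq_ediv_of_pos (by omega)
      have hmd : PySem.Int.mod n 2 = n % 2 :=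
        PySem.Int.mod_eq_emod_of_pos (by omega)
      have htn : (n / 2).toNat = n.toNat / 2 := by omega
      have hrec := ih (n.toNat / 2) (by omega) (n / 2) (i + 1) (by omega)
      rw [charsLSB, if_neg (by omega : ¬ n.toNat = 0)]
      rw [PySem.List.enumerate_cons, List.map_cons]
      rw [hfd, hmd, hrec, htn]
      have hdig : ((Nat.digitChar (n.toNat % 2)).toNat : Int) - 48 = n % 2 := by
        rcases Nat.mod_two_eq_zero_or_one n.toNat with h01 | h01 <;>
          rw [h01] <;> simp [Nat.digitChar] <;> omega
      have hi : ((i : Int), Nat.digitChar (n.toNat % 2)).1.toNat = i := by simp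
      simp only [hdig, hi]
      norm_cast
    · simp only [dif_neg h]
      have : n.toNat = 0 := by omega
      rw [this, charsLSB]
      simp

theorem base2_eq_alt (n : Int) : base2 n = base2_alt n := by
  unfold base2 base2_alt
  by_cases h : n ≤ 0
  · rw [if_pos h, base2Loop, dif_neg (by omega)]
  · rw [if_neg h]
    rw [base2Loop_eq_enumMap n.toNat n 0 rfl]
    unfold PySem.Int.toBinChars
    rw [if_neg (by omega : ¬ n < 0)]
    rw [toDigits_two_reverse n.toNat (by omega)]
    norm_num

-- ===== VERDICT (by name: the statement is the Claim_ definition above) =====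
theorem base2_spec : Claim_equal_base2 := by
  intro n _
  unfold Spec_base2
  exact base2_eq_alt n
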